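-- pv_equiv track=rewrite | github.com/Zhu-B/BattleshipPythonTest | boards.py | mark_surrounding
-- ===== SOURCE A (Python) =====
-- BOARD_SIZE = 8
--
-- def mark_surrounding(ship_cells, board):
--     """
--     Mark surrounding cells of sunk ship as misses.
--     """
--     # Check 8 directions
--     directions = [(-1,-1), (-1,0), (-1,1), (0,-1), (0,1), (1,-1), (1,0), (1,1)]
--     for (x, y) in ship_cells:
--         for dx, dy in directions:
--             nx, ny = x + dx, y + dy
--             if 0 <= nx < BOARD_SIZE and 0 <= ny < BOARD_SIZE:
--                 if board[ny][nx] == 0:  # No need to update areas already explored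
--                     board[ny][nx] = 1
--     return board
-- ===== SOURCE B (Python) =====
-- BOARD_SIZE = 8
--
-- def mark_surrounding(ship_cells, board):
--     """
--     Mark surrounding cells of sunk ship as misses.
--     Two phases: first compute the set of cells to flip (in-range neighbours of
--     ship cells that currently hold 0), then rebuild the whole board functionally,
--     scanning every cell once and testing membership in that set.
--     """
--     directions = [(-1, -1), (-1, 0), (-1, 1), (0, -1), (0, 1), (1, -1), (1, 0), (1, 1)]
--     ships = set(ship_cells)
--     flips = {(nx, ny)
--              for nx, ny in ((x + dx, y + dy) for x, y in ships for dx, dy in directions)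
--              if 0 <= nx < BOARD_SIZE and 0 <= ny < BOARD_SIZE and board[ny][nx] == 0}
--     return [[1 if (x, y) in flips else cell for x, cell in enumerate(row)]
--             for y, row in enumerate(board)]
-- ===== Notes on version B (the rewrite author's own statement) =====
-- stated objective: alternative
-- what changed: B inverts the traversal: it computes the set of cells to flip once (in-range neighbours of ship cells holding 0), then rebuilds the whole board functionally in a single scan testing membership in that set, instead of A's in-place nested loop writing into the board per ship cell and direction.
import Mathlib
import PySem

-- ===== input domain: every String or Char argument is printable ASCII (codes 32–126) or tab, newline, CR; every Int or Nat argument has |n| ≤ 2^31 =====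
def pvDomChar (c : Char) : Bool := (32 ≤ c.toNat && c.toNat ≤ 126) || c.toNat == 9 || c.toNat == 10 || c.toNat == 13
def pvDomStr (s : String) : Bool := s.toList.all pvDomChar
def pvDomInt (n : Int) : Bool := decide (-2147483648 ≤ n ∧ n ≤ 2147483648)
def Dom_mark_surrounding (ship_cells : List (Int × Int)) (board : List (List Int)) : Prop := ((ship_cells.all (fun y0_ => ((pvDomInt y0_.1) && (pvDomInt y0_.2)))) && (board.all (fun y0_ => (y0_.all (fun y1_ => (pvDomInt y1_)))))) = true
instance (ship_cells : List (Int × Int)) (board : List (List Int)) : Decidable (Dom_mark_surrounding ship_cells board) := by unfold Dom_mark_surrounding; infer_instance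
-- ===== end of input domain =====

-- B inverts the traversal: it computes the set of cells to flip once, then rebuilds the
-- whole board functionally in a single scan testing membership in that set, instead of
-- A's in-place nested loop writing into the board. A mutates the board argument in place
-- while B does not; the equivalence proved here is about the return value only.


-- ===== PORT A =====
-- directions = [(-1,-1), (-1,0), (-1,1), (0,-1), (0,1), (1,-1), (1,0), (1,1)]
def pvDirs : List (Int × Int) := [(-1,-1), (-1,0), (-1,1), (0,-1), (0,1), (1,-1), (1,0), (1,1)]

-- one inner-loop body of A: the in-range check, the read board[ny][nx], the write.
-- (pyGet? = none would be Python's IndexError; Pre_ excludes those inputs, the port no-ops.)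
def pvMark (b : List (List Int)) (nx ny : Int) : List (List Int) :=
  if 0 ≤ nx ∧ nx < 8 ∧ 0 ≤ ny ∧ ny < 8 then
    match PySem.List.pyGet? b ny with
    | some row =>
      match PySem.List.pyGet? row nx with
      | some v => if v = 0 then b.set ny.toNat (row.set nx.toNat (1 : Int)) else b
      | none => b
    | none => b
  else b

def mark_surrounding (ship_cells : List (Int × Int)) (board : List (List Int)) : List (List Int) :=
  ship_cells.foldl
    (fun b c => pvDirs.foldl (fun b' d => pvMark b' (c.1 + d.1) (c.2 + d.2)) b)
    board

-- ===== PORT B =====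
-- Source B's set comprehension 'flips': in-range neighbours of ship cells whose board value is
-- currently 0. The read board[ny][nx] is pyGet? (none = IndexError, where Source B raises like
-- A; Pre_ excludes those inputs, the port filters the cell out).
def pvFlips (cells : List (Int × Int)) (board : List (List Int)) : PySem.Set (Int × Int) :=
  PySem.Set.ofList
    (((PySem.Set.ofList cells : List (Int × Int)).flatMap
        (fun c => pvDirs.map (fun d => (c.1 + d.1, c.2 + d.2)))).filter
      (fun p => decide (0 ≤ p.1 ∧ p.1 < 8 ∧ 0 ≤ p.2 ∧ p.2 < 8) &&
        ((PySem.List.pyGet? board p.2).bind (fun row => PySem.List.pyGet? row p.1) == some 0)))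

-- Source B's nested list comprehension over enumerate(board)/enumerate(row): each cell is
-- replaced by 1 iff its coordinate is in flips
def mark_surrounding_alt (ship_cells : List (Int × Int)) (board : List (List Int)) : List (List Int) :=
  (PySem.List.enumerate board).map (fun yr =>
    (PySem.List.enumerate yr.2).map (fun xc =>
      if PySem.Set.contains (pvFlips ship_cells board) (xc.1, yr.1) then (1 : Int) else xc.2))

-- ===== PRECONDITION & SPEC =====
-- Pre_ excludes exactly the inputs on which A raises IndexError: some ship cell has a
-- neighbour inside the 8×8 range whose row or column index falls outside the given board.
def Pre_mark_surrounding (ship_cells : List (Int × Int)) (board : List (List Int)) : Prop :=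
  ∀ c ∈ ship_cells, ∀ d ∈ pvDirs,
    (0 ≤ c.1 + d.1 ∧ c.1 + d.1 < 8 ∧ 0 ≤ c.2 + d.2 ∧ c.2 + d.2 < 8) →
      (c.2 + d.2).toNat < board.length ∧
      (c.1 + d.1).toNat < (board.getD (c.2 + d.2).toNat []).length
instance (ship_cells : List (Int × Int)) (board : List (List Int)) : Decidable (Pre_mark_surrounding ship_cells board) := by unfold Pre_mark_surrounding; infer_instance

def pvWitness_mark_surrounding : (List (Int × Int)) × List (List Int) :=
  ([(0, 0)], [[0, 0], [0, 2]])

def Spec_mark_surrounding (ship_cells : List (Int × Int)) (board : List (List Int)) (out : List (List Int)) : Prop := out = mark_surrounding_alt ship_cells board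
instance (ship_cells : List (Int × Int)) (board : List (List Int)) (out : List (List Int)) : Decidable (Spec_mark_surrounding ship_cells board out) := by unfold Spec_mark_surrounding; infer_instance

-- ===== CLAIM (what is proved, stated in full; the proofs are below) =====
def Claim_equal_mark_surrounding : Prop := ∀ (ship_cells : List (Int × Int)) (board : List (List Int)), Dom_mark_surrounding ship_cells board → Pre_mark_surrounding ship_cells board → Spec_mark_surrounding ship_cells board (mark_surrounding ship_cells board)

-- ===== LEMMAS AND PROOFS =====

-- cell access b[y][x] as an Option
def pvGet2 (b : List (List Int)) (y x : Nat) : Option Int := b[y]?.bind (fun r => r[x]?)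

-- "some ship cell in cs has (x,y) among its 8 in-range neighbours"
def pvHit (cs : List (Int × Int)) (x y : Int) : Prop :=
  ∃ c ∈ cs, ∃ d ∈ pvDirs, x = c.1 + d.1 ∧ y = c.2 + d.2 ∧
    0 ≤ x ∧ x < 8 ∧ 0 ≤ y ∧ y < 8

theorem pvMark_length (b : List (List Int)) (nx ny : Int) :
    (pvMark b nx ny).length = b.length := by
  unfold pvMark
  split_ifs with h
  · cases hrow : PySem.List.pyGet? b ny with
    | none => rfl
    | some row =>
      dsimp only
      cases hv : PySem.List.pyGet? row nx with
      | none => rfl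
      | some v => dsimp only; split_ifs <;> simp
  · rfl

theorem pvLt {α : Type} {l : List α} {i : Nat} {a : α} (h : l[i]? = some a) : i < l.length := by
  by_contra hl
  rw [List.getElem?_eq_none_iff.mpr (by omega)] at h
  simp at h

theorem pvMark_get2 (b : List (List Int)) (nx ny : Int) (y x : Nat) :
    pvGet2 (pvMark b nx ny) y x =
      if (y : Int) = ny ∧ (x : Int) = nx ∧ 0 ≤ nx ∧ nx < 8 ∧ 0 ≤ ny ∧ ny < 8
          ∧ pvGet2 b y x = some 0
      then some 1 else pvGet2 b y x := by
  unfold pvMark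
  split_ifs with h hc
  · -- in-range, and the full condition holds
    obtain ⟨hy, hx, h1, h2, h3, h4, h0⟩ := hc
    rw [PySem.List.pyGet?_of_nonneg b h3]
    have hyn : ny.toNat = y := by omega
    have hxn : nx.toNat = x := by omega
    unfold pvGet2 at h0 ⊢
    cases hrow : b[ny.toNat]? with
    | none => rw [hyn] at hrow; simp [hrow] at h0
    | some row =>
      dsimp only
      rw [hyn] at hrow
      simp [hrow] at h0
      rw [PySem.List.pyGet?_of_nonneg row h1, hxn, h0]
      simp
      have hylen : y < b.length := pvLt hrow
      have hxlen : x < row.length := pvLt h0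
      simp [hyn, hylen, hxlen]
  · -- in-range but the full condition fails: the board must be unchanged
    push Not at hc
    rw [PySem.List.pyGet?_of_nonneg b (by omega : (0:Int) ≤ ny)]
    cases hrow : b[ny.toNat]? with
    | none => rfl
    | some row =>
      dsimp only
      rw [PySem.List.pyGet?_of_nonneg row (by omega : (0:Int) ≤ nx)]
      cases hv : row[nx.toNat]? with
      | none => rfl
      | some v =>
        dsimp only
        split_ifs with hv0
        · -- it wrote a 1; the coordinate condition must have failed
          subst hv0
          unfold pvGet2
          by_cases hyy : ny.toNat = y
          · by_cases hxx : nx.toNat = x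
            · exfalso
              apply hc (by omega) (by omega) h.1 h.2.1 h.2.2.1 h.2.2.2
              unfold pvGet2
              rw [hyy] at hrow; rw [hxx] at hv
              simp [hrow, hv]
            · have hylen : y < b.length := pvLt (hyy ▸ hrow)
              have hby : b[y] = row := by
                have h' : b[y]? = some row := hyy ▸ hrow
                rw [List.getElem?_eq_getElem hylen] at h'
                exact Option.some.inj h'
              simp [hyy, hylen, hby, hxx]
          · simp [hyy]
        · rfl
  · -- out of range, but the condition claims in-range: contradiction
    rename_i hc2
    exact absurd ⟨hc2.2.2.1, hc2.2.2.2.1, hc2.2.2.2.2.1, hc2.2.2.2.2.2.1⟩ h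
  · rfl

-- A's double loop, flattened to one fold over all (target, direction) marks
def pvMarkAll (ps : List (Int × Int)) (b : List (List Int)) : List (List Int) :=
  ps.foldl (fun b' p => pvMark b' p.1 p.2) b

theorem pvMarkAll_length (ps : List (Int × Int)) (b : List (List Int)) :
    (pvMarkAll ps b).length = b.length := by
  induction ps generalizing b with
  | nil => rfl
  | cons p ps ih => simp [pvMarkAll, List.foldl_cons] at ih ⊢; rw [ih, pvMark_length]

theorem pvMarkAll_get2 (ps : List (Int × Int)) (b : List (List Int)) (y x : Nat) :
    pvGet2 (pvMarkAll ps b) y x =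
      if (∃ p ∈ ps, (x : Int) = p.1 ∧ (y : Int) = p.2 ∧ 0 ≤ p.1 ∧ p.1 < 8 ∧ 0 ≤ p.2 ∧ p.2 < 8)
          ∧ pvGet2 b y x = some 0
      then some 1 else pvGet2 b y x := by
  induction ps generalizing b with
  | nil => simp [pvMarkAll]
  | cons p ps ih =>
    simp only [pvMarkAll, List.foldl_cons] at *
    rw [ih (pvMark b p.1 p.2), pvMark_get2]
    by_cases hC : ((y : Int) = p.2 ∧ (x : Int) = p.1 ∧ 0 ≤ p.1 ∧ p.1 < 8 ∧ 0 ≤ p.2 ∧ p.2 < 8 ∧ pvGet2 b y x = some 0)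
    · rw [if_pos hC]
      rw [if_neg (fun hh => by exact absurd (Option.some.inj hh.2) (by norm_num))]
      rw [if_pos ⟨⟨p, List.mem_cons_self, hC.2.1, hC.1, hC.2.2.1, hC.2.2.2.1,
        hC.2.2.2.2.1, hC.2.2.2.2.2.1⟩, hC.2.2.2.2.2.2⟩]
    · rw [if_neg hC]
      have hiff : ((∃ q ∈ ps, (x : Int) = q.1 ∧ (y : Int) = q.2 ∧ 0 ≤ q.1 ∧ q.1 < 8 ∧ 0 ≤ q.2 ∧ q.2 < 8)
            ∧ pvGet2 b y x = some 0)
          ↔ ((∃ q ∈ p :: ps, (x : Int) = q.1 ∧ (y : Int) = q.2 ∧ 0 ≤ q.1 ∧ q.1 < 8 ∧ 0 ≤ q.2 ∧ q.2 < 8)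
            ∧ pvGet2 b y x = some 0) := by
        constructor
        · rintro ⟨⟨q, hq, hr⟩, h0⟩
          exact ⟨⟨q, List.mem_cons_of_mem _ hq, hr⟩, h0⟩
        · rintro ⟨⟨q, hq, hr⟩, h0⟩
          rcases List.mem_cons.mp hq with rfl | hqs
          · exact absurd ⟨hr.2.1, hr.1, hr.2.2.1, hr.2.2.2.1, hr.2.2.2.2.1, hr.2.2.2.2.2, h0⟩ hC
          · exact ⟨⟨q, hqs, hr⟩, h0⟩
      rw [if_congr hiff rfl rfl]

theorem mark_surrounding_eq_markAll (cells : List (Int × Int)) (board : List (List Int)) :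
    mark_surrounding cells board =
      pvMarkAll (cells.flatMap (fun c => pvDirs.map (fun d => (c.1 + d.1, c.2 + d.2)))) board := by
  unfold mark_surrounding pvMarkAll
  rw [List.foldl_flatMap]
  simp [List.foldl_map]

theorem pvHit_iff_flat (cs : List (Int × Int)) (x y : Nat) :
    ((∃ p ∈ cs.flatMap (fun c => pvDirs.map (fun d => (c.1 + d.1, c.2 + d.2))),
        (x : Int) = p.1 ∧ (y : Int) = p.2 ∧ 0 ≤ p.1 ∧ p.1 < 8 ∧ 0 ≤ p.2 ∧ p.2 < 8))
      ↔ pvHit cs (x : Int) (y : Int) := by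
  unfold pvHit
  simp only [List.mem_flatMap, List.mem_map]
  constructor
  · rintro ⟨p, ⟨c, hc, d, hd, rfl⟩, hx, hy, h1, h2, h3, h4⟩
    dsimp only at hx hy h1 h2 h3 h4
    exact ⟨c, hc, d, hd, hx, hy, by omega, by omega, by omega, by omega⟩
  · rintro ⟨c, hc, d, hd, hx, hy, h1, h2, h3, h4⟩
    refine ⟨(c.1 + d.1, c.2 + d.2), ⟨c, hc, d, hd, rfl⟩, ?_, ?_, ?_, ?_, ?_, ?_⟩ <;>
      dsimp only <;> omega

-- membership in Source B's flips set, characterised against A's hit relation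
theorem mem_flips (cells : List (Int × Int)) (board : List (List Int)) (x y : Nat) :
    (((x : Int), (y : Int)) ∈ (pvFlips cells board : List (Int × Int))) ↔
      (pvHit cells (x : Int) (y : Int) ∧ pvGet2 board y x = some 0) := by
  unfold pvFlips pvHit pvGet2
  rw [PySem.Set.mem_ofList]
  simp only [List.mem_filter, List.mem_flatMap, List.mem_map, PySem.Set.mem_ofList,
    Bool.and_eq_true, decide_eq_true_eq, beq_iff_eq]
  constructor
  · rintro ⟨⟨c, hc, d, hd, hp⟩, ⟨h1, h2, h3, h4⟩, hval⟩
    rw [PySem.List.pyGet?_of_nonneg board (by omega)] at hval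
    have hyn : ((y : Int)).toNat = y := by omega
    refine ⟨⟨c, hc, d, hd, ?_, ?_, h1, h2, h3, h4⟩, ?_⟩
    · exact congrArg Prod.fst hp.symm
    · exact congrArg Prod.snd hp.symm
    · cases hrow : board[y]? with
      | none => rw [hyn, hrow] at hval; simp at hval
      | some row =>
        rw [hyn, hrow] at hval
        simp only [Option.bind_some] at hval ⊢
        rw [PySem.List.pyGet?_of_nonneg row (by omega)] at hval
        have hxn : ((x : Int)).toNat = x := by omega
        rwa [hxn] at hval
  · rintro ⟨⟨c, hc, d, hd, hx, hy, h1, h2, h3, h4⟩, hval⟩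
    refine ⟨⟨c, hc, d, hd, ?_⟩, ⟨h1, h2, h3, h4⟩, ?_⟩
    · exact Prod.ext hx.symm hy.symm
    · rw [PySem.List.pyGet?_of_nonneg board (by omega)]
      have hyn : ((y : Int)).toNat = y := by omega
      cases hrow : board[y]? with
      | none => rw [hrow] at hval; simp at hval
      | some row =>
        rw [hyn, hrow]
        rw [hrow] at hval
        simp only [Option.bind_some] at hval ⊢
        rw [PySem.List.pyGet?_of_nonneg row (by omega)]
        have hxn : ((x : Int)).toNat = x := by omega
        rwa [hxn]

theorem alt_length (cells : List (Int × Int)) (board : List (List Int)) :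
    (mark_surrounding_alt cells board).length = board.length := by
  unfold mark_surrounding_alt
  rw [List.length_map, PySem.List.length_enumerate]

theorem alt_get2 (cells : List (Int × Int)) (board : List (List Int)) (y x : Nat) :
    pvGet2 (mark_surrounding_alt cells board) y x =
      (pvGet2 board y x).map (fun cell =>
        if PySem.Set.contains (pvFlips cells board) ((x : Int), (y : Int)) = true
        then (1 : Int) else cell) := by
  unfold mark_surrounding_alt pvGet2
  rw [List.getElem?_map, PySem.List.getElem?_enumerate]
  cases hrow : board[y]? with
  | none => rfl
  | some row =>
    simp only [Option.map_some, Option.bind_some, List.getElem?_map,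
      PySem.List.getElem?_enumerate]
    cases hv : row[x]? with
    | none => rfl
    | some v => simp only [Option.map_some, Int.zero_add]

-- ===== VERDICT (by name: the statement is the Claim_ definition above) =====
theorem mark_surrounding_spec : Claim_equal_mark_surrounding := by
  intro cells board _ _
  unfold Spec_mark_surrounding
  rw [mark_surrounding_eq_markAll]
  apply List.ext_getElem?
  intro y
  have hlenA := pvMarkAll_length (cells.flatMap (fun c => pvDirs.map (fun d => (c.1 + d.1, c.2 + d.2)))) board
  have hlenB := alt_length cells board
  by_cases hy : y < board.length
  · have hA := List.getElem?_eq_getElem (l := pvMarkAll (cells.flatMap (fun c => pvDirs.map (fun d => (c.1 + d.1, c.2 + d.2)))) board) (i := y) (by omega)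
    have hB := List.getElem?_eq_getElem (l := mark_surrounding_alt cells board) (i := y) (by omega)
    rw [hA, hB]
    congr 1
    apply List.ext_getElem?
    intro x
    have h1 := pvMarkAll_get2 (cells.flatMap (fun c => pvDirs.map (fun d => (c.1 + d.1, c.2 + d.2)))) board y x
    have h2 := alt_get2 cells board y x
    unfold pvGet2 at h1 h2
    rw [hA] at h1
    rw [hB] at h2
    simp only [Option.bind_some] at h1 h2
    rw [h1, h2]
    cases hv : board[y]? with
    | none =>
      exfalso; exact absurd (List.getElem?_eq_getElem (l := board) (i := y) hy) (by simp [hv])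
    | some row =>
      simp only [Option.bind_some] at *
      cases hc : row[x]? with
      | none => simp
      | some cell =>
        simp only [Option.map_some]
        by_cases hQ : PySem.Set.contains (pvFlips cells board) ((x : Int), (y : Int)) = true
        · rw [if_pos hQ]
          have hm := (mem_flips cells board x y).mp ((PySem.Set.contains_iff _ _).mp hQ)
          unfold pvGet2 at hm
          rw [hv, Option.bind_some] at hm
          rw [if_pos ⟨(pvHit_iff_flat cells x y).mpr hm.1, by rw [← hc]; exact hm.2⟩]
        · rw [if_neg hQ, if_neg]
          rintro ⟨hflat, h0⟩
          apply hQ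
          apply (PySem.Set.contains_iff _ _).mpr
          apply (mem_flips cells board x y).mpr
          refine ⟨(pvHit_iff_flat cells x y).mp hflat, ?_⟩
          unfold pvGet2
          rw [hv, Option.bind_some, hc]
          exact h0
  · rw [List.getElem?_eq_none_iff.mpr (by omega), List.getElem?_eq_none_iff.mpr (by omega)]
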